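-- pv_equiv track=rewrite | github.com/GowthamSagar310/Competitive-Programming-Problems | 2167D.py | solve
-- ===== SOURCE A (Python) =====
-- def solve(arr):
--     primes = [
--         2, 3, 5, 7,
--         11, 13, 17, 19,
--         23, 29,
--         31, 37,
--         41, 43, 47,
--         53, 59,
--         61, 67,
--         71, 73, 79,
--         83, 89,
--         97
--     ]
--     mini = float("inf")
--     for num in arr:
--         # if the number is odd, gcd(2, odd) = 1 -> 2 is the smallest possible.
--         # if the number is even, gcd(2, even) = 2 != 1, so 2 cannot be the answer
--         # we have to find minimum possible number for which atleast one of the numbers, gcd(x, num) = 1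
--         # so x has to be a prime number and x should not divide the number
--         # in other way, we are just looking for the smallest prime number which is not present in the prime factorization of this number
--
--         # but how many prime numbers to check for ?
--         # given constraints: 2 <= x <= 10^18
--         # should we check for all the primes < 10^18 ? NO
--         # because,
--         # 1. if there is a number like 1011 = 3 * 337
--         # there is 5 missing from this number, so we will surely catch 5.
--         # 2. but what if all the primes (< 100) are present ?
--         # meaning, number = 3 * 5 * 7 * 11 * .... 97 = this pretty surely crosses 10^18 (which is not possible according to the question)
--         # so, in this scenario it is just -1
--
--         # so if some prime is not present, we will catch it.
--         # but all of these are present, then surely it is -1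
--
--         # it is actually sufficient to check till 53 because
--         # 2 * 3 * 5 * 7 ... 53 > 10^18
--         for p in primes:
--             if num % p:
--                 mini = min(mini, p)
--                 break
--     return mini if mini != float("inf") else -1
-- ===== SOURCE B (Python) =====
-- PRIMES = [
--     2, 3, 5, 7,
--     11, 13, 17, 19,
--     23, 29,
--     31, 37,
--     41, 43, 47,
--     53, 59,
--     61, 67,
--     71, 73, 79,
--     83, 89,
--     97
-- ]
--
--
-- def solve(arr):
--     # The minimum of "smallest prime not dividing num" over all num equals the
--     # first prime (in ascending order) that fails to divide at least one element.
--     for p in PRIMES: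
--         if any(num % p for num in arr):
--             return p
--     return -1
-- ===== Notes on version B (the rewrite author's own statement) =====
-- stated objective: faster
-- what changed: Transposed the loop nesting: instead of computing each element's smallest non-dividing prime and taking the minimum, B scans the primes in ascending order and returns the first one that fails to divide some element (correct because the primes list is sorted), with -1 when none qualifies.
import Mathlib
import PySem

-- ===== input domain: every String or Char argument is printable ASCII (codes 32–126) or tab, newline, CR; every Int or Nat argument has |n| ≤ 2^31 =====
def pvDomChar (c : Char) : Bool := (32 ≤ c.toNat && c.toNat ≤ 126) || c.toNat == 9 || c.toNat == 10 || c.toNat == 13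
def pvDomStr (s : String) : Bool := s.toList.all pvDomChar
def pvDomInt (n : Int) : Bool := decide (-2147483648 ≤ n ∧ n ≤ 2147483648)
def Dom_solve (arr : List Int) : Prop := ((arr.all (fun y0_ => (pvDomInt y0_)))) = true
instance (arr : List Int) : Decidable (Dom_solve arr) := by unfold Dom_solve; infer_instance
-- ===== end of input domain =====

-- B transposes A's loop nesting: it scans the primes in ascending order and returns the
-- first one failing to divide some element, instead of minimising per-element answers
-- (objective: alternative decomposition, same cost).

-- ===== PORT A =====
def primesA : List Int :=
  [2, 3, 5, 7, 11, 13, 17, 19, 23, 29, 31, 37, 41, 43, 47, 53, 59, 61, 67, 71, 73, 79, 83, 89, 97]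

-- Python's float("inf") sentinel for `mini` is ported as `none : Option Int`;
-- min(mini, p) with mini = inf is p.
def pymin : Option Int → Int → Int
  | none, p => p
  | some m, p => min m p

-- A's inner loop over primes: on the first prime p with num % p != 0, update mini and break.
def aInner (num : Int) : List Int → Option Int → Option Int
  | [], mini => mini
  | p :: ps, mini => if PySem.Int.mod num p ≠ 0 then some (pymin mini p) else aInner num ps mini

def solve (arr : List Int) : Int :=
  match arr.foldl (fun mini num => aInner num primesA mini) none with
  | none => -1
  | some m => m

-- ===== PORT B =====
def primesB : List Int :=
  [2, 3, 5, 7, 11, 13, 17, 19, 23, 29, 31, 37, 41, 43, 47, 53, 59, 61, 67, 71, 73, 79, 83, 89, 97]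

-- B's loop over primes: return the first prime not dividing some element, else -1.
def bLoop (arr : List Int) : List Int → Int
  | [] => -1
  | p :: ps => if arr.any (fun num => PySem.Int.mod num p != 0) then p else bLoop arr ps

def solve_alt (arr : List Int) : Int := bLoop arr primesB

-- ===== PRECONDITION & SPEC =====
def Spec_solve (arr : List Int) (out : Int) : Prop := out = solve_alt arr
instance (arr : List Int) (out : Int) : Decidable (Spec_solve arr out) := by unfold Spec_solve; infer_instance

-- ===== CLAIM (what is proved, stated in full; the proofs are below) =====
def Claim_equal_solve : Prop := ∀ (arr : List Int), Dom_solve arr → Spec_solve arr (solve arr)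

-- ===== LEMMAS AND PROOFS =====

-- aInner's result, if some, is bounded below by any lower bound of the primes and of mini.
theorem aInner_bound (num c : Int) : ∀ (ps : List Int) (mini : Option Int),
    (∀ q ∈ ps, c ≤ q) → (∀ x, mini = some x → c ≤ x) →
    ∀ x, aInner num ps mini = some x → c ≤ x := by
  intro ps
  induction ps with
  | nil => intro mini _ hm x hx; exact hm x hx
  | cons p ps ih =>
    intro mini hps hm x hx
    simp only [aInner] at hx
    split at hx
    · cases hx
      cases mini with
      | none => exact hps p (List.mem_cons_self ..)
      | some m =>
        simp only [pymin, le_min_iff]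
        exact ⟨hm m rfl, hps p (List.mem_cons_self ..)⟩
    · exact ih mini (fun q hq => hps q (List.mem_cons_of_mem _ hq)) hm x hx

-- When mini is already the minimum of all remaining primes, aInner keeps it.
theorem aInner_somep (num p : Int) : ∀ (ps : List Int),
    (∀ q ∈ ps, p ≤ q) → aInner num ps (some p) = some p := by
  intro ps
  induction ps with
  | nil => intro _; rfl
  | cons q ps ih =>
    intro hps
    simp only [aInner]
    split
    · simp only [pymin, Option.some.injEq]
      exact min_eq_left (hps q (List.mem_cons_self ..))
    · exact ih (fun r hr => hps r (List.mem_cons_of_mem _ hr))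

-- If some element is not divisible by the head prime p (or mini is already p),
-- the fold over arr with primes p :: ps ends at exactly p.
theorem fold_hit (p : Int) (ps : List Int) (hps : ∀ q ∈ ps, p ≤ q) :
    ∀ (arr : List Int) (mini : Option Int),
    (∀ x, mini = some x → p ≤ x) →
    ((∃ n ∈ arr, PySem.Int.mod n p ≠ 0) ∨ mini = some p) →
    arr.foldl (fun m n => aInner n (p :: ps) m) mini = some p := by
  intro arr
  induction arr with
  | nil =>
    intro mini _ h
    rcases h with ⟨n, hn, _⟩ | h
    · exact absurd hn (List.not_mem_nil)
    · simpa using h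
  | cons n arr ih =>
    intro mini hm h
    simp only [List.foldl_cons]
    by_cases hd : PySem.Int.mod n p ≠ 0
    · have hstep : aInner n (p :: ps) mini = some p := by
        simp only [aInner, if_pos hd]
        cases mini with
        | none => rfl
        | some m =>
          simp only [pymin, Option.some.injEq]
          exact min_eq_right (hm m rfl)
      rw [hstep]
      exact ih (some p) (by rintro x rfl2; cases rfl2; rfl) (Or.inr rfl)
    · have hstep : aInner n (p :: ps) mini = aInner n ps mini := by
        simp only [aInner, if_neg hd]
      rw [hstep]
      rcases h with ⟨m, hmem, hmod⟩ | h
      · rcases List.mem_cons.1 hmem with rfl | hmem'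
        · exact absurd hmod hd
        · exact ih _ (aInner_bound n p ps mini hps hm) (Or.inl ⟨m, hmem', hmod⟩)
      · subst h
        rw [aInner_somep n p ps hps]
        exact ih (some p) (by rintro x rfl2; cases rfl2; rfl) (Or.inr rfl)

-- If every element is divisible by the head prime p, the head prime plays no role.
theorem fold_skip (p : Int) (ps : List Int) :
    ∀ (arr : List Int) (mini : Option Int),
    (∀ n ∈ arr, PySem.Int.mod n p = 0) →
    arr.foldl (fun m n => aInner n (p :: ps) m) mini
      = arr.foldl (fun m n => aInner n ps m) mini := by
  intro arr
  induction arr with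
  | nil => intro mini _; rfl
  | cons n arr ih =>
    intro mini hall
    simp only [List.foldl_cons]
    have hstep : aInner n (p :: ps) mini = aInner n ps mini := by
      have h0 : PySem.Int.mod n p = 0 := hall n (List.mem_cons_self ..)
      simp only [aInner, h0, ne_eq, not_true_eq_false, if_false]
    rw [hstep]
    exact ih _ (fun m hm => hall m (List.mem_cons_of_mem _ hm))

-- With no primes left, A's fold never changes the state.
theorem fold_nil (arr : List Int) (mini : Option Int) :
    arr.foldl (fun m n => aInner n [] m) mini = mini := by
  induction arr generalizing mini with
  | nil => rfl
  | cons n arr ih => simp only [List.foldl_cons, aInner]; exact ih mini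

-- Main: for any ascending primes list, A's fold-and-match equals B's prime scan.
theorem main_equiv : ∀ (ps : List Int), List.Pairwise (· ≤ ·) ps → ∀ (arr : List Int),
    (match arr.foldl (fun m n => aInner n ps m) none with
      | none => -1
      | some m => m) = bLoop arr ps := by
  intro ps
  induction ps with
  | nil => intro _ arr; rw [fold_nil]; rfl
  | cons p ps ih =>
    intro hpw arr
    have h1 : ∀ q ∈ ps, p ≤ q := (List.pairwise_cons.1 hpw).1
    have h2 := (List.pairwise_cons.1 hpw).2
    by_cases hany : arr.any (fun num => PySem.Int.mod num p != 0) = true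
    · have hex : ∃ n ∈ arr, PySem.Int.mod n p ≠ 0 := by
        simpa using hany
      rw [fold_hit p ps h1 arr none (by intro x hx; cases hx) (Or.inl hex)]
      simp [bLoop, hany]
    · have hall : ∀ n ∈ arr, PySem.Int.mod n p = 0 := by
        intro n hn
        have := (List.any_eq_false ..).1 (Bool.eq_false_iff.2 hany) n hn
        simpa using this
      rw [fold_skip p ps arr none hall]
      simp only [bLoop, if_neg hany]
      exact ih h2 arr

-- ===== VERDICT (by name: the statement is the Claim_ definition above) =====
theorem solve_spec : Claim_equal_solve := by
  intro arr _
  show solve arr = solve_alt arr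
  unfold solve solve_alt
  have hps : primesB = primesA := rfl
  rw [hps]
  exact main_equiv primesA (by decide) arr
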